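-- pv_equiv track=rewrite | github.com/UOR-Foundation/atlas-embeddings | atlas/aep/moonshine_integration.py | sigma_k
-- ===== SOURCE A (Python) =====
-- def sigma_k(n: int, k: int) -> int:
--     """
--     Compute divisor sum: sigma_k(n) = sum_{d | n} d^k.
--     """
--     if n <= 0:
--         return 0
--     total = 0
--     d = 1
--     while d * d <= n:
--         if n % d == 0:
--             total += d ** k
--             if d != n // d:
--                 total += (n // d) ** k
--         d += 1
--     return total
-- ===== SOURCE B (Python) =====
-- def sigma_k(n: int, k: int) -> int:
--     """
--     Compute divisor sum: sigma_k(n) = sum_{d | n} d^k.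
--     Multiplicative formula: factor n by trial division and multiply the
--     divisor power sums of its prime-power parts.
--     """
--     if n <= 0:
--         return 0
--     total = 1
--     m = n
--     p = 2
--     while p * p <= m:
--         if m % p == 0:
--             exp = 0
--             while m % p == 0:
--                 m //= p
--                 exp += 1
--             term = 0
--             for j in range(exp + 1):
--                 term += p ** (j * k)
--             total *= term
--         p += 1
--     if m > 1:
--         total *= 1 + m ** k
--     return total
-- ===== Notes on version B (the rewrite author's own statement) =====
-- stated objective: alternative
-- what changed: Replaced the sqrt(n) divisor-pairing loop (adding d^k and the co-divisor (n//d)^k per step) with trial-division prime factorization of n and the multiplicative formula: sigma_k(n) is the product over prime powers p^a || n of the geometric sums 1 + p^k + ... + p^(a*k); this does one modulus test per candidate p but only a handful of big-integer powers (one per prime-power divisor) instead of one per divisor pair.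
-- outside the precondition, e.g. on sigma_k(68, -2): A returns 1.3170415224913494, B returns 1.3170415224913496
import Mathlib
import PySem

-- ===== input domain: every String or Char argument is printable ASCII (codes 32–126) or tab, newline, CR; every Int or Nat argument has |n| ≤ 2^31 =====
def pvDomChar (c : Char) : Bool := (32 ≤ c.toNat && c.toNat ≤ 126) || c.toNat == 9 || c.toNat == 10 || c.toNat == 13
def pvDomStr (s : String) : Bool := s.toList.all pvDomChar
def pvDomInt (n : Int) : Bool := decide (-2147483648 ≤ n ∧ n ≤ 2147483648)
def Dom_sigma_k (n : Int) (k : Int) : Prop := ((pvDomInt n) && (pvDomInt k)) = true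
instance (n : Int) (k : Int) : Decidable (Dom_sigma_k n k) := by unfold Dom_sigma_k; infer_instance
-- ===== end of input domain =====

-- B replaces A's √n divisor-pairing loop by a different algorithm: trial-division prime factorization with the multiplicative formula sigma_k(n) = ∏ over prime powers of geometric sums.


-- ===== PORT A =====
-- A's while loop: d counts up while d*d ≤ n; `d ** k` is ported as `d ^ k.toNat`,
-- exact for k ≥ 0 (Pre_ excludes k < 0 with n ≥ 1, where Python produces a float).
def sigmaLoop (n k d total : Int) : Int :=
  if _h : d * d ≤ n then
    sigmaLoop n k (d + 1)
      (if PySem.Int.mod n d == 0 then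
        (total + d ^ k.toNat) +
          (if d ≠ PySem.Int.floordiv n d then (PySem.Int.floordiv n d) ^ k.toNat else 0)
      else total)
  else total
termination_by (n + 1 - d).toNat
decreasing_by
  have hd : d ≤ n := by rcases le_or_gt 1 d with h0 | h0 <;> nlinarith
  omega

def sigma_k (n : Int) (k : Int) : Int :=
  if n ≤ 0 then 0 else sigmaLoop n k 1 0

-- ===== PORT B =====
-- B's inner `while m % p == 0: m //= p; exp += 1`; fuel m.toNat bounds the
-- iteration count (each step divides m by p ≥ 2), proved sufficient in pullOut_spec.
def pullOut (p : Int) : Nat → Int → Int → Int × Int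
  | 0, m, e => (m, e)
  | fuel + 1, m, e =>
    if PySem.Int.mod m p == 0 then pullOut p fuel (PySem.Int.floordiv m p) (e + 1)
    else (m, e)

-- B's `term = 0; for j in range(exp + 1): term += p ** (j * k)`; `**` as `^ ·.toNat`, exact for k ≥ 0
def geomTerm (p k e : Int) : Int :=
  (PySem.List.pyRange 0 (e + 1) 1).foldl (fun acc j => acc + p ^ (j * k).toNat) 0

-- B's outer `while p * p <= m` loop and trailing `if m > 1`; the fuel only bounds
-- the number of iterations (p grows, m never grows), proved sufficient in factLoop_inv.
def factLoop (k : Int) : Nat → Int → Int → Int → Int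
  | 0, m, _p, total => if 1 < m then total * (1 + m ^ k.toNat) else total
  | fuel + 1, m, p, total =>
    if p * p ≤ m then
      if PySem.Int.mod m p == 0 then
        let r := pullOut p m.toNat m 0
        factLoop k fuel r.1 (p + 1) (total * geomTerm p k r.2)
      else factLoop k fuel m (p + 1) total
    else if 1 < m then total * (1 + m ^ k.toNat) else total

def sigma_k_alt (n : Int) (k : Int) : Int :=
  if n ≤ 0 then 0 else factLoop k (n.toNat + 2) n 2 1

-- ===== PRECONDITION & SPEC =====
-- Pre_ excludes n ≥ 1 with k < 0: there Python's d ** k is a float, so A (and B) return a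
-- float, not a value of the declared int type.
def Pre_sigma_k (n : Int) (k : Int) : Prop := n ≤ 0 ∨ 0 ≤ k
instance (n : Int) (k : Int) : Decidable (Pre_sigma_k n k) := by unfold Pre_sigma_k; infer_instance
def pvWitness_sigma_k : Int × Int := (12, 2)

def Spec_sigma_k (n : Int) (k : Int) (out : Int) : Prop := out = sigma_k_alt n k
instance (n : Int) (k : Int) (out : Int) : Decidable (Spec_sigma_k n k out) := by unfold Spec_sigma_k; infer_instance

-- ===== CLAIM (what is proved, stated in full; the proofs are below) =====
def Claim_equal_sigma_k : Prop := ∀ (n : Int) (k : Int), Dom_sigma_k n k → Pre_sigma_k n k → Spec_sigma_k n k (sigma_k n k)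

-- ===== LEMMAS AND PROOFS =====

-- The divisor sum A's loop still has to collect from step d on: divisors e of n
-- that the pairing loop first visits at min(e, n/e) ≥ d.
noncomputable def divSum (n k d : Int) : Int :=
  ∑ e ∈ Finset.Icc 1 n, if n % e = 0 ∧ d ≤ e ∧ d ≤ n / e then e ^ k.toNat else 0

lemma divSum_empty {n k d : Int} (hd : 1 ≤ d) (h : ¬ d * d ≤ n) : divSum n k d = 0 := by
  unfold divSum
  apply Finset.sum_eq_zero
  intro e he
  rw [Finset.mem_Icc] at he
  rw [if_neg]
  rintro ⟨hdvd, hde, hdn⟩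
  have hm : e * (n / e) = n := Int.mul_ediv_cancel' (Int.dvd_of_emod_eq_zero hdvd)
  nlinarith

-- one loop step peels off the divisors first visited at exactly d
lemma divSum_step {n k d : Int} (hd : 1 ≤ d) (h : d * d ≤ n) :
    divSum n k d =
      (if n % d = 0 then d ^ k.toNat + (if d ≠ n / d then (n / d) ^ k.toNat else 0) else 0)
        + divSum n k (d + 1) := by
  have hd0 : (0:Int) < d := hd
  have hdn : d ≤ n / d := (Int.le_ediv_iff_mul_le hd0).mpr h
  have hdln : d ≤ n := by nlinarith
  have hn0 : (0:Int) ≤ n := by nlinarith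
  unfold divSum
  have hsplit : ∀ e ∈ Finset.Icc 1 n,
      (if n % e = 0 ∧ d ≤ e ∧ d ≤ n / e then e ^ k.toNat else 0)
        = (if n % e = 0 ∧ (e = d ∨ n / e = d) then e ^ k.toNat else 0)
          + (if n % e = 0 ∧ d + 1 ≤ e ∧ d + 1 ≤ n / e then e ^ k.toNat else 0) := by
    intro e he
    rw [Finset.mem_Icc] at he
    by_cases hdvd : n % e = 0
    · have hme : e * (n / e) = n := Int.mul_ediv_cancel' (Int.dvd_of_emod_eq_zero hdvd)
      have h_ed : e = d → d ≤ n / e := by rintro rfl; exact hdn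
      have h_bd : n / e = d → d ≤ e := by
        intro hb
        have he' : e = n / d := by
          rw [hb] at hme
          rw [← hme, Int.mul_ediv_cancel _ (by omega)]
        omega
      simp only [hdvd, true_and]
      generalize e ^ k.toNat = x
      split_ifs <;> omega
    · simp [hdvd]
  rw [Finset.sum_congr rfl hsplit, Finset.sum_add_distrib]
  congr 1
  -- the peeled-off part equals the loop body's contribution at d
  by_cases hdvd : n % d = 0
  · have hddvd : d ∣ n := Int.dvd_of_emod_eq_zero hdvd
    have hmd : d * (n / d) = n := Int.mul_ediv_cancel' hddvd
    have hnd1 : 1 ≤ n / d := le_trans hd hdn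
    have hndn : n / d ≤ n := Int.ediv_le_self d hn0
    have hcomod : n % (n / d) = 0 :=
      Int.emod_eq_zero_of_dvd ⟨d, by rw [mul_comm]; omega⟩
    have hback : n / (n / d) = d := by
      have hmd' : n / d * d = n := by rw [mul_comm]; exact hmd
      have hc := Int.mul_ediv_cancel_left (b := d) (a := n / d) (by omega)
      rw [hmd'] at hc
      exact hc
    have hkey : ∀ e ∈ Finset.Icc 1 n,
        ((n % e = 0 ∧ (e = d ∨ n / e = d)) ↔ (e = d ∨ e = n / d)) := by
      intro e he
      rw [Finset.mem_Icc] at he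
      constructor
      · rintro ⟨hedvd, rfl | hq⟩
        · exact Or.inl rfl
        · right
          have hme : e * (n / e) = n := Int.mul_ediv_cancel' (Int.dvd_of_emod_eq_zero hedvd)
          rw [hq] at hme
          rw [← hme, Int.mul_ediv_cancel _ (by omega)]
      · rintro (rfl | rfl)
        · exact ⟨hdvd, Or.inl rfl⟩
        · exact ⟨hcomod, Or.inr hback⟩
    calc (∑ e ∈ Finset.Icc 1 n, if n % e = 0 ∧ (e = d ∨ n / e = d) then e ^ k.toNat else 0)
        = ∑ e ∈ Finset.Icc 1 n, if e = d ∨ e = n / d then e ^ k.toNat else 0 := by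
          refine Finset.sum_congr rfl fun e he => ?_
          rw [if_congr (hkey e he) rfl rfl]
      _ = ∑ e ∈ (Finset.Icc 1 n).filter (fun e => e = d ∨ e = n / d), e ^ k.toNat := by
          rw [Finset.sum_filter]
      _ = if n % d = 0 then d ^ k.toNat + (if d ≠ n / d then (n / d) ^ k.toNat else 0) else 0 := by
          rw [if_pos hdvd]
          by_cases heq : d = n / d
          · have hset : (Finset.Icc 1 n).filter (fun e => e = d ∨ e = n / d) = {d} := by
              ext e
              simp only [Finset.mem_filter, Finset.mem_Icc, Finset.mem_singleton]
              constructor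
              · rintro ⟨_, rfl | rfl⟩ <;> omega
              · rintro rfl; exact ⟨⟨hd, hdln⟩, Or.inl rfl⟩
            rw [hset, Finset.sum_singleton, if_neg (by simpa using heq)]
            omega
          · have hset : (Finset.Icc 1 n).filter (fun e => e = d ∨ e = n / d) = {d, n / d} := by
              ext e
              simp only [Finset.mem_filter, Finset.mem_Icc, Finset.mem_insert, Finset.mem_singleton]
              constructor
              · rintro ⟨_, h'⟩; exact h'
              · rintro (rfl | rfl)
                · exact ⟨⟨hd, hdln⟩, Or.inl rfl⟩
                · exact ⟨⟨hnd1, hndn⟩, Or.inr rfl⟩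
            rw [hset, Finset.sum_pair heq, if_pos (by simpa using heq)]
  · rw [if_neg hdvd]
    apply Finset.sum_eq_zero
    intro e he
    rw [Finset.mem_Icc] at he
    rw [if_neg]
    rintro ⟨hedvd, rfl | hq⟩
    · exact hdvd hedvd
    · have hme : e * (n / e) = n := Int.mul_ediv_cancel' (Int.dvd_of_emod_eq_zero hedvd)
      rw [hq] at hme
      exact hdvd (Int.emod_eq_zero_of_dvd ⟨e, by rw [← hme, mul_comm]⟩)

lemma sigmaLoop_inv (n k : Int) :
    ∀ m (d total : Int), (n + 1 - d).toNat ≤ m → 1 ≤ d →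
      sigmaLoop n k d total = total + divSum n k d := by
  intro m
  induction m with
  | zero =>
    intro d total hm hd
    have hstop : ¬ d * d ≤ n := by
      intro hc
      have hnd : n + 1 ≤ d := by omega
      nlinarith
    rw [sigmaLoop, dif_neg hstop, divSum_empty hd hstop]
    omega
  | succ m ih =>
    intro d total hm hd
    by_cases h : d * d ≤ n
    · have hdln : d ≤ n := by nlinarith
      have hd0 : (0:Int) < d := hd
      rw [sigmaLoop, dif_pos h, ih (d + 1) _ (by omega) (by omega), divSum_step hd h,
        PySem.Int.mod_eq_emod_of_pos hd0, PySem.Int.floordiv_eq_ediv_of_pos hd0]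
      simp only [beq_iff_eq]
      split_ifs <;> ring
    · rw [sigmaLoop, dif_neg h, divSum_empty hd h]
      omega

-- ===== B side: the factorization loop computes the same divisor sum =====

noncomputable def natSigma (K N : ℕ) : ℕ := ∑ d ∈ N.divisors, d ^ K

lemma natSigma_one (K : ℕ) : natSigma K 1 = 1 := by simp [natSigma]

lemma natSigma_mul (K : ℕ) {M M' : ℕ} (h : M.Coprime M') :
    natSigma K (M * M') = natSigma K M * natSigma K M' := by
  have hm := (ArithmeticFunction.isMultiplicative_sigma (k := K)).map_mul_of_coprime h
  simpa [ArithmeticFunction.sigma_apply, natSigma] using hm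

lemma natSigma_prime_pow (K : ℕ) {P : ℕ} (hp : P.Prime) (a : ℕ) :
    natSigma K (P ^ a) = ∑ j ∈ Finset.range (a + 1), P ^ (j * K) := by
  unfold natSigma
  rw [Nat.sum_divisors_prime_pow hp]
  exact Finset.sum_congr rfl fun j _ => (pow_mul P j K).symm

lemma natSigma_prime (K : ℕ) {M : ℕ} (hp : M.Prime) : natSigma K M = 1 + M ^ K := by
  unfold natSigma
  rw [hp.divisors, Finset.sum_pair hp.one_lt.ne]
  simp

lemma listSum_range (f : ℕ → ℤ) : ∀ n, ((List.range n).map f).sum = ∑ j ∈ Finset.range n, f j := by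
  intro n
  induction n with
  | zero => simp
  | succ n ih => rw [List.range_succ, Finset.sum_range_succ, List.map_append, List.sum_append, ih]; simp

lemma pullOut_spec {p : Int} (hp : 2 ≤ p) :
    ∀ (fuel : Nat) (m e : Int), 1 ≤ m → m.toNat ≤ fuel →
      ∃ (m' : Int) (a : ℕ), pullOut p fuel m e = (m', e + a) ∧ m = m' * p ^ a ∧ ¬ (p ∣ m') ∧ 1 ≤ m' := by
  intro fuel
  induction fuel with
  | zero => intro m e hm hf; omega
  | succ fuel ih =>
    intro m e hm hf
    by_cases hdvd : p ∣ m
    · have hple : p ≤ m := Int.le_of_dvd (by omega) hdvd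
      have h1 : 1 ≤ m / p := (Int.le_ediv_iff_mul_le (by omega)).mpr (by omega)
      have hcan : m / p * p = m := Int.ediv_mul_cancel hdvd
      have hlt : m / p < m := by nlinarith
      obtain ⟨m', a, heq, hprod, hnd, hm1⟩ := ih (m / p) (e + 1) h1 (by omega)
      refine ⟨m', a + 1, ?_, ?_, hnd, hm1⟩
      · rw [pullOut, if_pos (by simp [PySem.Int.mod_eq_zero_iff_dvd, hdvd]),
          PySem.Int.floordiv_eq_ediv_of_pos (by omega : (0:Int) < p), heq]
        congr 1
        push_cast
        ring
      · rw [← hcan, hprod, pow_succ]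
        ring
    · refine ⟨m, 0, ?_, by simp, hdvd, hm⟩
      rw [pullOut, if_neg (by simp [PySem.Int.mod_eq_zero_iff_dvd, hdvd])]
      simp

lemma geomTerm_eq {p k : Int} (hp : 0 ≤ p) (hk : 0 ≤ k) (hpp : p.toNat.Prime) (a : ℕ) :
    geomTerm p k (a : Int) = ((natSigma k.toNat (p.toNat ^ a) : ℕ) : Int) := by
  unfold geomTerm
  rw [PySem.List.foldl_add, PySem.List.pyRange_one]
  have hcount : ((a : Int) + 1 - 0).toNat = a + 1 := by omega
  rw [hcount, List.map_map, listSum_range, natSigma_prime_pow k.toNat hpp a]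
  rw [Nat.cast_sum]
  rw [zero_add]
  refine Finset.sum_congr rfl fun j _ => ?_
  have hjk : ((0 + (j : Int)) * k).toNat = j * k.toNat := by
    have hc : ((0 + (j : Int)) * k) = ((j * k.toNat : ℕ) : Int) := by
      push_cast [Int.toNat_of_nonneg hk]
      ring
    rw [hc, Int.toNat_natCast]
  show p ^ ((0 + (j : Int)) * k).toNat = ((p.toNat ^ (j * k.toNat) : ℕ) : Int)
  rw [hjk]
  push_cast [Int.toNat_of_nonneg hp]
  rfl

-- the exit value of B's loop (the trailing `if m > 1`) is σ_k of the remaining m,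
-- which is 1 or prime once all prime factors of m are ≥ p > √m
lemma factExit {k m p total : Int} (hm : 1 ≤ m) (hp : 2 ≤ p)
    (hstop : ¬ p * p ≤ m)
    (hfac : ∀ q : ℕ, q.Prime → (q : Int) ∣ m → p ≤ (q : Int)) :
    (if 1 < m then total * (1 + m ^ k.toNat) else total)
      = total * ((natSigma k.toNat m.toNat : ℕ) : Int) := by
  by_cases h1 : 1 < m
  · rw [if_pos h1]
    have hM2 : 2 ≤ m.toNat := by omega
    have hMprime : m.toNat.Prime := by
      by_contra hnp
      have hq := Nat.minFac_prime (show m.toNat ≠ 1 by omega)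
      have hqd : ((m.toNat.minFac : ℕ) : Int) ∣ m := by
        have := Nat.minFac_dvd m.toNat
        have hcast : ((m.toNat : ℕ) : Int) = m := Int.toNat_of_nonneg (by omega)
        exact hcast ▸ Int.natCast_dvd_natCast.mpr this
      have hge := hfac _ hq hqd
      have hsq := Nat.minFac_sq_le_self (show 0 < m.toNat by omega) hnp
      have hsq' : ((m.toNat.minFac ^ 2 : ℕ) : Int) ≤ m := by
        calc ((m.toNat.minFac ^ 2 : ℕ) : Int) ≤ ((m.toNat : ℕ) : Int) := Int.ofNat_le.mpr hsq
          _ = m := Int.toNat_of_nonneg (by omega)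
      push_cast at hsq'
      nlinarith
    rw [natSigma_prime k.toNat hMprime]
    have hcast : ((m.toNat : ℕ) : Int) = m := Int.toNat_of_nonneg (by omega)
    push_cast [hcast]
    ring
  · rw [if_neg h1]
    have hm1 : m = 1 := by omega
    rw [hm1]
    simp [natSigma_one]

lemma factLoop_inv {k : Int} (hk : 0 ≤ k) :
    ∀ (fuel : Nat) (m p total : Int), 1 ≤ m → 2 ≤ p → (m + 1 - p).toNat < fuel →
      (∀ q : ℕ, q.Prime → (q : Int) ∣ m → p ≤ (q : Int)) →
      factLoop k fuel m p total = total * ((natSigma k.toNat m.toNat : ℕ) : Int) := by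
  intro fuel
  induction fuel with
  | zero => intro m p total _ _ hf _; omega
  | succ fuel ih =>
    intro m p total hm hp hf hfac
    by_cases hloop : p * p ≤ m
    · have hpm : p ≤ m := by nlinarith
      by_cases hdvd : p ∣ m
      · -- p divides m: p must be prime (all prime factors of m are ≥ p)
        have hPprime : p.toNat.Prime := by
          have hq := Nat.minFac_prime (show p.toNat ≠ 1 by omega)
          have hqdp : ((p.toNat.minFac : ℕ) : Int) ∣ p := by
            have := Nat.minFac_dvd p.toNat
            have hcast : ((p.toNat : ℕ) : Int) = p := Int.toNat_of_nonneg (by omega)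
            exact hcast ▸ Int.natCast_dvd_natCast.mpr this
          have hge := hfac _ hq (hqdp.trans hdvd)
          have hle : p.toNat.minFac ≤ p.toNat := Nat.minFac_le (by omega)
          have : p.toNat.minFac = p.toNat := by omega
          rw [← this]
          exact hq
        obtain ⟨m', a, heq, hprod, hnd, hm1⟩ := pullOut_spec hp m.toNat m 0 hm (le_refl _)
        have hppos : (0:Int) < p := by omega
        have hpa1 : (1:Int) ≤ p ^ a := one_le_pow₀ (by omega)
        have hm'le : m' ≤ m := by nlinarith
        have hfac' : ∀ q : ℕ, q.Prime → (q : Int) ∣ m' → p + 1 ≤ (q : Int) := by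
          intro q hq hqd
          have hqm : (q : Int) ∣ m := hprod ▸ hqd.mul_right _
          have hge := hfac q hq hqm
          rcases lt_or_eq_of_le hge with hlt | heqq
          · omega
          · exfalso
            exact hnd (heqq ▸ hqd)
        rw [factLoop, if_pos hloop, if_pos (by simp [PySem.Int.mod_eq_zero_iff_dvd, hdvd]), heq]
        show factLoop k fuel m' (p + 1) (total * geomTerm p k ((0 : Int) + (a : Int))) = _
        rw [zero_add,
          ih m' (p + 1) _ hm1 (by omega) (by omega) hfac',
          geomTerm_eq (by omega) hk hPprime a]
        -- combine: natSigma K (P^a) * natSigma K M' = natSigma K M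
        have hMeq : m.toNat = p.toNat ^ a * m'.toNat := by
          have : ((p.toNat ^ a * m'.toNat : ℕ) : Int) = m := by
            push_cast [Int.toNat_of_nonneg (show (0:Int) ≤ p by omega),
              Int.toNat_of_nonneg (show (0:Int) ≤ m' by omega)]
            rw [hprod]; ring
          omega
        have hcop : (p.toNat ^ a).Coprime m'.toNat := by
          refine Nat.Coprime.pow_left a ((Nat.Prime.coprime_iff_not_dvd hPprime).mpr ?_)
          intro hc
          apply hnd
          have := Int.natCast_dvd_natCast.mpr hc
          rwa [Int.toNat_of_nonneg (show (0:Int) ≤ p by omega),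
            Int.toNat_of_nonneg (show (0:Int) ≤ m' by omega)] at this
        rw [hMeq, natSigma_mul k.toNat hcop]
        push_cast
        ring
      · rw [factLoop, if_pos hloop, if_neg (by simp [PySem.Int.mod_eq_zero_iff_dvd, hdvd])]
        refine ih m (p + 1) total hm (by omega) (by omega) ?_
        intro q hq hqd
        have hge := hfac q hq hqd
        rcases lt_or_eq_of_le hge with hlt | heqq
        · omega
        · exact absurd (heqq ▸ hqd) hdvd
    · rw [factLoop, if_neg hloop]
      exact factExit hm hp hloop hfac

-- A's divisor sum over Int equals the Nat divisor-power sum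
lemma divSum_eq_natSigma {n k : Int} (hn : 1 ≤ n) :
    divSum n k 1 = ((natSigma k.toNat n.toNat : ℕ) : Int) := by
  unfold divSum natSigma
  rw [← Finset.sum_filter, Nat.cast_sum]
  refine Finset.sum_nbij' (fun e => e.toNat) (fun d => (d : Int)) ?_ ?_ ?_ ?_ ?_
  · intro e he
    simp only [Finset.mem_filter, Finset.mem_Icc] at he
    obtain ⟨⟨h1, h2⟩, hdvd, _, _⟩ := he
    rw [Nat.mem_divisors]
    constructor
    · have : e ∣ n := Int.dvd_of_emod_eq_zero hdvd
      have hcast : ((e.toNat : ℕ) : Int) = e := Int.toNat_of_nonneg (by omega)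
      have hcast' : ((n.toNat : ℕ) : Int) = n := Int.toNat_of_nonneg (by omega)
      rw [← Int.natCast_dvd_natCast, hcast, hcast']
      exact this
    · omega
  · intro d hd
    rw [Nat.mem_divisors] at hd
    obtain ⟨hdvd, hne⟩ := hd
    have hd1 : 1 ≤ d := Nat.pos_of_dvd_of_pos hdvd (by omega)
    have hdn : d ≤ n.toNat := Nat.le_of_dvd (by omega) hdvd
    have hdvdZ : ((d : ℕ) : Int) ∣ n := by
      have hcast' : ((n.toNat : ℕ) : Int) = n := Int.toNat_of_nonneg (by omega)
      exact hcast' ▸ Int.natCast_dvd_natCast.mpr hdvd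
    simp only [Finset.mem_filter, Finset.mem_Icc]
    refine ⟨⟨by omega, by omega⟩, Int.emod_eq_zero_of_dvd hdvdZ, by omega, ?_⟩
    rw [Int.le_ediv_iff_mul_le (by omega : (0:Int) < (d : Int))]
    omega
  · intro e he
    simp only [Finset.mem_filter, Finset.mem_Icc] at he
    show ((e.toNat : ℕ) : Int) = e
    omega
  · intro d _
    show ((d : Int)).toNat = d
    omega
  · intro e he
    simp only [Finset.mem_filter, Finset.mem_Icc] at he
    have hcast : ((e.toNat : ℕ) : Int) = e := Int.toNat_of_nonneg (by omega)
    rw [← hcast]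
    push_cast
    rfl

-- ===== VERDICT (by name: the statement is the Claim_ definition above) =====
theorem sigma_k_spec : Claim_equal_sigma_k := by
  intro n k _ hpre
  unfold Spec_sigma_k sigma_k sigma_k_alt
  by_cases hn : n ≤ 0
  · rw [if_pos hn, if_pos hn]
  · rw [if_neg hn, if_neg hn]
    have hn1 : 1 ≤ n := by omega
    have hk : 0 ≤ k := by
      rcases hpre with h | h
      · omega
      · exact h
    rw [sigmaLoop_inv n k (n + 1 - 1).toNat 1 0 (by omega) (by omega),
      divSum_eq_natSigma hn1,
      factLoop_inv hk (n.toNat + 2) n 2 1 hn1 (by omega) (by omega)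
        (fun q hq _ => by exact_mod_cast hq.two_le)]
    ring
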